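-- pv_equiv track=rewrite | github.com/JinyangLi01/UnfairlyTreatedGroupDetection | Coding/Algorithms/DevelopingHistory/NewAlgRanking_10_20211212.py | findParentForStr
-- ===== SOURCE A (Python) =====
-- def findParentForStr(child):
--     end = 0
--     start = 0
--     length = len(child)
--     i = length - 1
--     while i > -1:
--         if child[i] != '|':
--             end = i + 1
--             i -= 1
--             break
--         i -= 1
--     while i > -1:
--         if child[i] == '|':
--             start = i
--             parent = child[:start + 1] + child[end:]
--             return parent
--         i -= 1
--     parent = child[end:]
--     return parent
-- ===== SOURCE B (Python) =====
-- def findParentForStr(child):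
--     parts = child.split('|')
--     last = -1
--     for i, p in enumerate(parts):
--         if p:
--             last = i
--     if last >= 0:
--         parts[last] = ''
--     return '|'.join(parts)
-- ===== Notes on version B (the rewrite author's own statement) =====
-- stated objective: alternative
-- what changed: Replaced A's two backward character-index loops and slice arithmetic with a tokenization approach: split the string into segments on the separator, blank the last non-empty segment found by one forward pass, and rejoin; the C-level split/join give a constant-factor speedup over A's per-character Python loops.
import Mathlib
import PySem

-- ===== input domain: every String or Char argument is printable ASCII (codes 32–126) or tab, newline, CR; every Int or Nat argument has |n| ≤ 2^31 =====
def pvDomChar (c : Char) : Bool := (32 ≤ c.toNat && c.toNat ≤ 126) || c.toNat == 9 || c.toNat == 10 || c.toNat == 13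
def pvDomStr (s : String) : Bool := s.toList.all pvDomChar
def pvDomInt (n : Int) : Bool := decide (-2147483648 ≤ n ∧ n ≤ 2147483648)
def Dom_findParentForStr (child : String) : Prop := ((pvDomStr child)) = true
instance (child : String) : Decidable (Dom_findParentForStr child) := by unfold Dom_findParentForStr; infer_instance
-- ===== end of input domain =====

-- B replaces A's two backward character-index loops with a tokenization approach:
-- split on '|', blank the last non-empty segment (found by one forward pass), rejoin.

-- ===== PORT A =====
-- first while loop: i counts down from length-1; n here is i+1, so "i > -1" is "n > 0".
-- child[i] is always in range when called with n ≤ length; getD is the total rendering of that in-range access.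
-- returns (end, i+1 after the break decrement) — i.e. (n, n-1) at the break index n-1, (0,0) if the loop ran out.
def loopA1 (cs : List Char) : Nat → Nat × Nat
  | 0 => (0, 0)
  | n + 1 => if cs.getD n ' ' ≠ '|' then (n + 1, n) else loopA1 cs n

-- second while loop: scans i = n-1 down to 0 looking for '|'; returns the index `start` if found.
def loopA2 (cs : List Char) : Nat → Option Nat
  | 0 => none
  | n + 1 => if cs.getD n ' ' = '|' then some n else loopA2 cs n

def findParentForStr (child : String) : String :=
  let cs := child.toList
  let r := loopA1 cs cs.length
  match loopA2 cs r.2 with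
  | some start => String.ofList (cs.take (start + 1) ++ cs.drop r.1)  -- child[:start+1] + child[end:]
  | none => String.ofList (cs.drop r.1)                                -- child[end:]

-- ===== PORT B =====
def findParentForStr_alt (child : String) : String :=
  let parts := PySem.Chars.splitOn child.toList ['|']                  -- parts = child.split('|')
  let last := (PySem.List.enumerate parts).foldl                       -- for i, p in enumerate(parts): if p: last = i
      (fun acc ip => if ip.2 ≠ [] then ip.1 else acc) (-1 : Int)
  let parts' := if 0 ≤ last then parts.set last.toNat [] else parts    -- if last >= 0: parts[last] = ''
  String.ofList (PySem.Chars.join ['|'] parts')                        -- return '|'.join(parts)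

-- ===== PRECONDITION & SPEC =====
def Spec_findParentForStr (child : String) (out : String) : Prop := out = findParentForStr_alt child
instance (child : String) (out : String) : Decidable (Spec_findParentForStr child out) := by unfold Spec_findParentForStr; infer_instance

-- ===== CLAIM (what is proved, stated in full; the proofs are below) =====
def Claim_equal_findParentForStr : Prop := ∀ (child : String), Dom_findParentForStr child → Spec_findParentForStr child (findParentForStr child)

-- ===== LEMMAS AND PROOFS =====

-- the common canonical value both ports are reduced to:
-- strip the trailing pipes, cut the string after its last remaining '|', re-append the pipes.
def K (u : List Char) : Nat :=
  match u.reverse.findIdx? (· = '|') with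
  | some j => u.length - j
  | none => 0

def canon (cs : List Char) : List Char :=
  let s := (cs.reverse.dropWhile (· = '|')).reverse
  s.take (K s) ++ List.replicate (cs.length - s.length) '|'

-- ---------- A-side: the two loops compute the canonical decomposition ----------

theorem loopA1_eq (cs : List Char) : ∀ n, n ≤ cs.length →
    loopA1 cs n =
      (let d := ((cs.take n).reverse).dropWhile (· = '|'); (d.length, d.length - 1)) := by
  intro n
  induction n with
  | zero => intro _; simp [loopA1]
  | succ m ih =>
    intro h
    have hm : m < cs.length := h
    have htake : (cs.take (m + 1)).reverse = cs[m] :: (cs.take m).reverse := by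
      rw [List.take_add_one]
      simp [List.getElem?_eq_getElem hm]
    have hget : cs[m]? = some cs[m] := List.getElem?_eq_getElem hm
    by_cases hc : cs[m] = '|'
    · have := ih (Nat.le_of_lt hm)
      simp [loopA1, List.getD, hget, hc, htake, this]
    · simp [loopA1, List.getD, hget, hc, htake]
      omega

theorem loopA2_eq (cs : List Char) : ∀ n, n ≤ cs.length →
    loopA2 cs n = ((cs.take n).reverse.findIdx? (· = '|')).map (fun j => n - 1 - j) := by
  intro n
  induction n with
  | zero => intro _; simp [loopA2]
  | succ m ih =>
    intro h
    have hm : m < cs.length := h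
    have htake : (cs.take (m + 1)).reverse = cs[m] :: (cs.take m).reverse := by
      rw [List.take_add_one]
      simp [List.getElem?_eq_getElem hm]
    have hget : cs[m]? = some cs[m] := List.getElem?_eq_getElem hm
    by_cases hc : cs[m] = '|'
    · simp [loopA2, List.getD, hget, hc, htake, List.findIdx?_cons]
    · simp only [loopA2, List.getD, hget, Option.getD_some, hc, if_false, htake,
        List.findIdx?_cons, decide_eq_true_eq]
      rw [ih (Nat.le_of_lt hm), Option.map_map]
      congr 1
      funext j
      simp only [Function.comp]
      omega

theorem all_pipe_replicate (l : List Char) (h : ∀ c ∈ l, c = '|') :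
    l = List.replicate l.length '|' := by
  apply List.eq_replicate_of_mem h

theorem findParentForStr_core (cs : List Char) :
    findParentForStr (String.ofList cs) = String.ofList (canon cs) := by
  have hsplit : cs.reverse.takeWhile (· = '|') ++ cs.reverse.dropWhile (· = '|') = cs.reverse :=
    List.takeWhile_append_dropWhile
  have htwpipe : ∀ c ∈ cs.reverse.takeWhile (· = '|'), c = '|' := by
    intro c hc
    have := List.mem_takeWhile_imp hc
    simpa using this
  have htwrep : (cs.reverse.takeWhile (· = '|')).reverse
      = List.replicate (cs.reverse.takeWhile (· = '|')).length '|' := by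
    have h := all_pipe_replicate (cs.reverse.takeWhile (· = '|')).reverse
      (by intro c hc; exact htwpipe c (by simpa using hc))
    simpa using h
  simp only [findParentForStr, canon, K, String.toList_ofList]
  rcases hdm : cs.reverse.dropWhile (fun x => decide (x = '|')) with _ | ⟨c, d'⟩
  · -- the whole string is pipes
    have hcseq : cs = (cs.reverse.takeWhile (· = '|')).reverse := by
      rw [hdm] at hsplit
      have : cs.reverse.reverse = (cs.reverse.takeWhile (· = '|') ++ []).reverse := by
        rw [hsplit]
      simpa using this
    have hcsrep : cs = List.replicate cs.length '|' := by
      apply all_pipe_replicate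
      intro ch hch
      apply htwpipe
      rw [hcseq] at hch
      simpa using hch
    rw [loopA1_eq cs cs.length le_rfl]
    simp only [List.take_length]
    rw [hdm]
    simp only [List.length_nil, Nat.zero_sub, loopA2, List.drop_zero, List.reverse_nil,
      List.findIdx?_nil, List.take_nil, List.nil_append]
    simp only [Nat.sub_zero]
    rw [← hcsrep]
  · -- last segment exists: d = c :: d', c ≠ '|'
    have hc : ¬ (c = '|') := by
      have := List.head_dropWhile_not (p := fun x => decide (x = '|')) (l := cs.reverse)
      rw [hdm] at this
      simpa using this (by simp)
    have hcseq : cs = d'.reverse ++ [c] ++ (cs.reverse.takeWhile (· = '|')).reverse := by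
      rw [hdm] at hsplit
      have : cs.reverse.reverse = (cs.reverse.takeWhile (· = '|') ++ (c :: d')).reverse := by
        rw [hsplit]
      simpa [List.append_assoc] using this
    have hd'le : d'.length ≤ cs.length := by
      have := congrArg List.length hcseq
      simp at this
      omega
    have h1 : loopA1 cs cs.length = (d'.length + 1, d'.length) := by
      rw [loopA1_eq cs cs.length le_rfl]
      simp only [List.take_length, hdm]
      simp
    have htake' : cs.take d'.length = d'.reverse := by
      conv_lhs => rw [hcseq]
      rw [List.append_assoc, List.take_append_of_le_length (by simp)]
      simp
    have h2 : loopA2 cs d'.length = (d'.findIdx? (· = '|')).map (fun j => d'.length - 1 - j) := by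
      rw [loopA2_eq cs d'.length hd'le, htake']
      simp
    have hdropA : cs.drop (d'.length + 1) = (cs.reverse.takeWhile (· = '|')).reverse := by
      conv_lhs => rw [hcseq]
      rw [List.drop_append_of_le_length (by simp)]
      simp
    have hrevrev : ((c :: d').reverse).reverse = c :: d' := by simp
    rw [h1]
    simp only [hrevrev]
    rw [h2]
    have htrail : List.replicate (cs.length - ((c :: d').reverse).length) '|'
        = (cs.reverse.takeWhile (· = '|')).reverse := by
      rw [htwrep]
      congr 1
      have := congrArg List.length hcseq
      simp at this ⊢
      omega
    rw [htrail]
    rcases hfi : d'.findIdx? (fun x => decide (x = '|')) with _ | j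
    · simp only [Option.map_none, List.findIdx?_cons, decide_eq_true_eq, hc, if_false, hfi,
        Option.map_none]
      rw [hdropA]
      simp
    · simp only [Option.map_some, List.findIdx?_cons, decide_eq_true_eq, hc, if_false, hfi,
        Option.map_some]
      rw [hdropA]
      have hj : j < d'.length := (List.findIdx?_eq_some_iff_findIdx_eq.mp hfi).1
      have hk : d'.length - 1 - j + 1 = d'.length - j := by omega
      have hkB : (c :: d').reverse.length - (j + 1) = d'.length - j := by
        simp only [List.length_reverse, List.length_cons]
        omega
      rw [hk, hkB]
      have htakeeq : cs.take (d'.length - j) = ((c :: d').reverse).take (d'.length - j) := by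
        conv_lhs => rw [hcseq]
        rw [List.reverse_cons, List.append_assoc,
          List.take_append_of_le_length (by simp),
          List.take_append_of_le_length (by simp)]
      rw [htakeeq]

-- ---------- B-side: a recursive model of split('|') ----------

def sp : List Char → List (List Char)
  | [] => [[]]
  | c :: rest =>
      if c = '|' then [] :: sp rest
      else match sp rest with
        | [] => [[c]]
        | h :: t => (c :: h) :: t

def mapFirst (f : List Char → List Char) : List (List Char) → List (List Char)
  | [] => []
  | h :: t => f h :: t

theorem sp_ne_nil : ∀ cs : List Char, sp cs ≠ [] := by
  intro cs
  cases cs with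
  | nil => simp [sp]
  | cons c rest =>
    simp only [sp]
    split
    · simp
    · cases hsp : sp rest <;> simp

theorem sp_cons_pipe (rest : List Char) : sp ('|' :: rest) = [] :: sp rest := by
  simp [sp]

theorem sp_cons_nonpipe (c : Char) (rest : List Char) (hc : c ≠ '|') (h : List Char)
    (t : List (List Char)) (hsp : sp rest = h :: t) : sp (c :: rest) = (c :: h) :: t := by
  simp [sp, hc, hsp]

theorem mapFirst_id (l : List (List Char)) : mapFirst (fun x => x) l = l := by
  cases l <;> simp [mapFirst]

theorem go_eq : ∀ (fuel : Nat) (l cur : List Char) (acc : List (List Char)), l.length ≤ fuel →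
    PySem.Chars.splitOn.go ['|'] fuel l cur acc
      = acc.reverse ++ mapFirst (cur.reverse ++ ·) (sp l) := by
  intro fuel
  induction fuel with
  | zero =>
    intro l cur acc h
    have : l = [] := List.eq_nil_of_length_eq_zero (Nat.le_zero.mp h)
    subst this
    simp [PySem.Chars.splitOn.go, sp, mapFirst]
  | succ fuel ih =>
    intro l cur acc h
    cases l with
    | nil => simp [PySem.Chars.splitOn.go, sp, mapFirst]
    | cons c rest =>
      rw [PySem.Chars.splitOn.go.eq_def]
      simp only []
      by_cases hc : c = '|'
      · subst hc
        have hpre : ['|'].isPrefixOf ('|' :: rest) = true := by simp [List.isPrefixOf]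
        rw [if_pos hpre]
        have : List.drop (['|'] : List Char).length ('|' :: rest) = rest := by simp
        rw [this, ih rest [] _ (by simpa using Nat.le_of_succ_le_succ h)]
        have hm : mapFirst (fun x => ([] : List Char).reverse ++ x) (sp rest) = sp rest := by
          simpa using mapFirst_id (sp rest)
        rw [hm]
        simp only [sp]
        cases hsp : sp rest with
        | nil => exact absurd hsp (sp_ne_nil rest)
        | cons h' t' => simp [mapFirst]
      · have hpre : ['|'].isPrefixOf (c :: rest) = false := by
          simp [List.isPrefixOf]
          exact fun h' => absurd h'.symm hc
        rw [if_neg (by simp [hpre])]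
        rw [ih rest (c :: cur) acc (by simpa using Nat.le_of_succ_le_succ h)]
        simp only [sp, if_neg hc]
        cases hsp : sp rest with
        | nil => exact absurd hsp (sp_ne_nil rest)
        | cons h' t' => simp [mapFirst]

theorem splitOn_eq_sp (cs : List Char) : PySem.Chars.splitOn cs ['|'] = sp cs := by
  unfold PySem.Chars.splitOn
  rw [go_eq (cs.length + 1) cs [] [] (by omega)]
  simpa using mapFirst_id (sp cs)

theorem sp_no_pipe : ∀ u : List Char, '|' ∉ u → sp u = [u] := by
  intro u
  induction u with
  | nil => intro _; rfl
  | cons c rest ih =>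
    intro h
    have hc : c ≠ '|' := fun hh => h (by simp [hh])
    have hr : '|' ∉ rest := fun hh => h (by simp [hh])
    simp only [sp, if_neg hc, ih hr]

theorem length_sp : ∀ u : List Char, (sp u).length = u.count '|' + 1 := by
  intro u
  induction u with
  | nil => rfl
  | cons c rest ih =>
    by_cases hc : c = '|'
    · subst hc; simp [sp, ih]
    · simp only [sp, if_neg hc]
      cases hsp : sp rest with
      | nil => exact absurd hsp (sp_ne_nil rest)
      | cons h t =>
        rw [hsp] at ih
        simp at ih ⊢
        simp [hc]
        omega

theorem sp_append_pipe : ∀ xs : List Char, sp (xs ++ ['|']) = sp xs ++ [[]] := by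
  intro xs
  induction xs with
  | nil => rfl
  | cons c rest ih =>
    by_cases hc : c = '|'
    · subst hc; simp only [List.cons_append, sp, ih]; rfl
    · simp only [List.cons_append, sp, if_neg hc, ih]
      cases hsp : sp rest with
      | nil => exact absurd hsp (sp_ne_nil rest)
      | cons h t => simp

theorem sp_append_replicate : ∀ (k : Nat) (xs : List Char),
    sp (xs ++ List.replicate k '|') = sp xs ++ List.replicate k [] := by
  intro k
  induction k with
  | zero => simp
  | succ k ih =>
    intro xs
    rw [List.replicate_succ' (n := k), ← List.append_assoc, sp_append_pipe, ih,
      List.replicate_succ' (n := k)]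
    simp

theorem sp_append_nonpipe (c : Char) (hc : c ≠ '|') : ∀ xs : List Char,
    ∃ qs p, sp (xs ++ [c]) = qs ++ [p] ∧ p ≠ [] := by
  intro xs
  induction xs with
  | nil => exact ⟨[], [c], by simp [sp, hc], by simp⟩
  | cons x rest ih =>
    obtain ⟨qs, p, hqs, hp⟩ := ih
    by_cases hx : x = '|'
    · exact ⟨[] :: qs, p, by simp [sp, hx, hqs], hp⟩
    · cases qs with
      | nil =>
        refine ⟨[], x :: p, ?_, by simp⟩
        simp at hqs
        simp [sp, hx, hqs]
      | cons q qs' =>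
        refine ⟨(x :: q) :: qs', p, ?_, hp⟩
        simp at hqs
        simp [sp, hx, hqs]

-- the forward `for i, p in enumerate(parts)` loop finds the index of the last non-empty part
theorem fold_last_empty : ∀ (l : List (List Char)) (a acc : Int), (∀ p ∈ l, p = []) →
    (PySem.List.enumerate l a).foldl (fun acc ip => if ip.2 ≠ [] then ip.1 else acc) acc = acc := by
  intro l
  induction l with
  | nil => intro a acc _; simp [PySem.List.enumerate]
  | cons p l ih =>
    intro a acc h
    rw [PySem.List.enumerate_cons]
    have hp : p = [] := h p (by simp)
    simp only [List.foldl_cons, hp]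
    simpa using ih (a + 1) acc (fun q hq => h q (by simp [hq]))

theorem fold_last (l1 : List (List Char)) (p : List Char) (l2 : List (List Char))
    (a acc : Int) (hp : p ≠ []) (h2 : ∀ q ∈ l2, q = []) :
    (PySem.List.enumerate (l1 ++ [p] ++ l2) a).foldl
      (fun acc ip => if ip.2 ≠ [] then ip.1 else acc) acc = a + l1.length := by
  rw [PySem.List.enumerate_append, PySem.List.enumerate_append, List.foldl_append,
    List.foldl_append, PySem.List.enumerate_cons]
  simp only [List.foldl_cons]
  rw [fold_last_empty l2 _ _ h2]
  simp [hp]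

theorem intercalate_cons_cons (p q : List Char) (ps : List (List Char)) :
    List.intercalate ['|'] (p :: q :: ps) = p ++ '|' :: List.intercalate ['|'] (q :: ps) := by
  simp [List.intercalate, List.intersperse]

theorem intercalate_replicate_nil : ∀ (k : Nat) (p : List Char),
    List.intercalate ['|'] (p :: List.replicate k []) = p ++ List.replicate k '|' := by
  intro k
  induction k with
  | zero => intro p; simp [List.intercalate]
  | succ k ih =>
    intro p
    rw [List.replicate_succ, intercalate_cons_cons, ih]
    simp [List.replicate_succ]

theorem intercalate_append_replicate : ∀ (ps : List (List Char)) (k : Nat), ps ≠ [] →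
    List.intercalate ['|'] (ps ++ List.replicate k [])
      = List.intercalate ['|'] ps ++ List.replicate k '|' := by
  intro ps
  induction ps with
  | nil => intro k h; exact absurd rfl h
  | cons p ps ih =>
    intro k _
    cases ps with
    | nil =>
      simp only [List.singleton_append]
      rw [intercalate_replicate_nil]
      simp [List.intercalate]
    | cons q ps' =>
      rw [show (p :: q :: ps') ++ List.replicate k ([] : List Char)
            = p :: q :: (ps' ++ List.replicate k []) by simp]
      rw [intercalate_cons_cons]
      rw [show (q :: (ps' ++ List.replicate k ([] : List Char)))
            = (q :: ps') ++ List.replicate k [] by simp]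
      rw [ih k (by simp), intercalate_cons_cons]
      simp

-- blanking the LAST part of sp u and rejoining cuts u right after its last '|'
theorem join_blank : ∀ u : List Char,
    List.intercalate ['|'] ((sp u).set ((sp u).length - 1) []) = u.take (K u) := by
  intro u
  induction u with
  | nil => simp [sp, K, List.intercalate]
  | cons c rest ih =>
    have hKrw : (c :: rest).reverse.findIdx? (· = '|')
        = (rest.reverse.findIdx? (· = '|')).or
            ((([c] : List Char).findIdx? (· = '|')).map (fun i => i + rest.reverse.length)) := by
      rw [List.reverse_cons, List.findIdx?_append]
    by_cases hmem : '|' ∈ rest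
    · -- the pipe is found inside rest
      have hsome : ∃ j, rest.reverse.findIdx? (· = '|') = some j := by
        rcases hf : rest.reverse.findIdx? (· = '|') with _ | j
        · rw [List.findIdx?_eq_none_iff] at hf
          have := hf '|' (List.mem_reverse.mpr hmem)
          simp at this
        · exact ⟨j, rfl⟩
      obtain ⟨j, hj⟩ := hsome
      have hjlt : j < rest.length := by
        have := (List.findIdx?_eq_some_iff_findIdx_eq.mp hj).1
        simpa using this
      have hKr : K rest = rest.length - j := by
        unfold K
        rw [hj]
      have hKc : K (c :: rest) = K rest + 1 := by
        have h1 : K (c :: rest) = (c :: rest).length - j := by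
          unfold K
          rw [hKrw, hj, Option.some_or]
        rw [h1, hKr]
        simp only [List.length_cons]
        omega
      have hlen2 : 2 ≤ (sp rest).length := by
        rw [length_sp]
        have : 0 < rest.count '|' := List.count_pos_iff.mpr hmem
        omega
      by_cases hc : c = '|'
      · subst hc
        rw [sp_cons_pipe]
        obtain ⟨m, hm⟩ : ∃ m, (sp rest).length = m + 1 := ⟨(sp rest).length - 1, by omega⟩
        have hset : (([] : List Char) :: sp rest).set ((([] : List Char) :: sp rest).length - 1) []
            = [] :: (sp rest).set ((sp rest).length - 1) [] := by
          have e1 : (([] : List Char) :: sp rest).length - 1 = m + 1 := by simp [hm]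
          have e2 : (sp rest).length - 1 = m := by omega
          rw [e1, e2, List.set_cons_succ]
        rw [hset]
        have hne : (sp rest).set ((sp rest).length - 1) [] ≠ [] := by
          intro hcon
          have := congrArg List.length hcon
          rw [List.length_set] at this
          simp [hm] at this
        obtain ⟨h', t', hht⟩ : ∃ h' t', (sp rest).set ((sp rest).length - 1) [] = h' :: t' := by
          cases hx : (sp rest).set ((sp rest).length - 1) [] with
          | nil => exact absurd hx hne
          | cons h' t' => exact ⟨h', t', rfl⟩
        rw [hht, intercalate_cons_cons, ← hht, ih, hKc]
        simp
      · -- c is a non-pipe head, it stays on the first part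
        obtain ⟨h, t, hht⟩ : ∃ h t, sp rest = h :: t := by
          cases hx : sp rest with
          | nil => exact absurd hx (sp_ne_nil rest)
          | cons h t => exact ⟨h, t, rfl⟩
        rw [sp_cons_nonpipe c rest hc h t hht]
        have htne : t ≠ [] := by
          intro hcon
          rw [hht, hcon] at hlen2
          simp at hlen2
        obtain ⟨m, hmt⟩ : ∃ m, t.length = m + 1 :=
          ⟨t.length - 1, by cases t with | nil => exact absurd rfl htne | cons _ _ => simp⟩
        have e1 : t.length - 1 = m := by omega
        have hset : ((c :: h) :: t).set (((c :: h) :: t).length - 1) []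
            = (c :: h) :: t.set (t.length - 1) [] := by
          have e2 : ((c :: h) :: t).length - 1 = m + 1 := by simp [hmt]
          rw [e2, e1, List.set_cons_succ]
        rw [hset]
        have hsetIH : (sp rest).set ((sp rest).length - 1) [] = h :: t.set (t.length - 1) [] := by
          rw [hht]
          have e2 : (h :: t).length - 1 = m + 1 := by simp [hmt]
          rw [e2, e1, List.set_cons_succ]
        rw [hsetIH] at ih
        have htne' : t.set (t.length - 1) [] ≠ [] := by
          intro hcon
          have := congrArg List.length hcon
          rw [List.length_set] at this
          simp [hmt] at this
        obtain ⟨q, t', hqt⟩ : ∃ q t', t.set (t.length - 1) [] = q :: t' := by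
          cases hx : t.set (t.length - 1) [] with
          | nil => exact absurd hx htne'
          | cons q t' => exact ⟨q, t', rfl⟩
        rw [hqt] at ih ⊢
        rw [intercalate_cons_cons] at ih ⊢
        rw [hKc]
        simp only [List.take_succ_cons]
        rw [← ih]
        simp
    · -- no pipe in rest: sp rest is the single part [rest]
      have hnone : rest.reverse.findIdx? (· = '|') = none := by
        rw [List.findIdx?_eq_none_iff]
        intro x hx
        have hxr : x ∈ rest := List.mem_reverse.mp hx
        rcases eq_or_ne x '|' with he | he
        · exact absurd (he ▸ hxr) hmem
        · simp [he]
      have hsp1 : sp rest = [rest] := sp_no_pipe rest hmem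
      by_cases hc : c = '|'
      · subst hc
        have hKc : K ('|' :: rest) = 1 := by
          unfold K
          rw [hKrw, hnone, Option.none_or]
          simp
        rw [sp_cons_pipe, hsp1, hKc]
        simp [List.intercalate, List.intersperse]
      · have hKc : K (c :: rest) = 0 := by
          unfold K
          rw [hKrw, hnone, Option.none_or]
          simp [hc]
        rw [sp_cons_nonpipe c rest hc rest [] hsp1, hKc]
        simp [List.intercalate]

theorem alt_core (cs : List Char) :
    findParentForStr_alt (String.ofList cs) = String.ofList (canon cs) := by
  have hsplit : cs.reverse.takeWhile (· = '|') ++ cs.reverse.dropWhile (· = '|') = cs.reverse :=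
    List.takeWhile_append_dropWhile
  have htwpipe : ∀ c ∈ cs.reverse.takeWhile (· = '|'), c = '|' := by
    intro c hc
    have := List.mem_takeWhile_imp hc
    simpa using this
  have htwrep : (cs.reverse.takeWhile (· = '|')).reverse
      = List.replicate (cs.reverse.takeWhile (· = '|')).length '|' := by
    have h := all_pipe_replicate (cs.reverse.takeWhile (· = '|')).reverse
      (by intro c hc; exact htwpipe c (by simpa using hc))
    simpa using h
  simp only [findParentForStr_alt, canon, String.toList_ofList, splitOn_eq_sp, PySem.Chars.join]
  rcases hdm : cs.reverse.dropWhile (fun x => decide (x = '|')) with _ | ⟨c, d'⟩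
  · -- the whole string is pipes: the loop never finds a non-empty part, parts stay unchanged
    have hcseq : cs = (cs.reverse.takeWhile (· = '|')).reverse := by
      rw [hdm] at hsplit
      have : cs.reverse.reverse = (cs.reverse.takeWhile (· = '|') ++ []).reverse := by
        rw [hsplit]
      simpa using this
    have hcsrep : cs = List.replicate cs.length '|' := by
      apply all_pipe_replicate
      intro ch hch
      apply htwpipe
      rw [hcseq] at hch
      simpa using hch
    have hsp : sp cs = [] :: List.replicate cs.length [] := by
      conv_lhs => rw [hcsrep]
      rw [show List.replicate cs.length '|' = [] ++ List.replicate cs.length '|' by simp,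
        sp_append_replicate]
      rfl
    have hfold : (PySem.List.enumerate (sp cs)).foldl
        (fun acc ip => if ip.2 ≠ [] then ip.1 else acc) (-1 : Int) = -1 := by
      apply fold_last_empty
      intro p hp
      rw [hsp] at hp
      rcases List.mem_cons.mp hp with hp | hp
      · exact hp
      · exact List.eq_of_mem_replicate hp
    rw [hfold, if_neg (by norm_num), hsp]
    rw [intercalate_replicate_nil cs.length []]
    simp
  · -- last segment exists
    have hc : ¬ (c = '|') := by
      have := List.head_dropWhile_not (p := fun x => decide (x = '|')) (l := cs.reverse)
      rw [hdm] at this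
      simpa using this (by simp)
    have hcseq : cs = d'.reverse ++ [c] ++ (cs.reverse.takeWhile (· = '|')).reverse := by
      rw [hdm] at hsplit
      have : cs.reverse.reverse = (cs.reverse.takeWhile (· = '|') ++ (c :: d')).reverse := by
        rw [hsplit]
      simpa [List.append_assoc] using this
    set u := d'.reverse ++ [c] with hu
    set k := (cs.reverse.takeWhile (· = '|')).length with hk
    have hcs2 : cs = u ++ List.replicate k '|' := by
      rw [hcseq, htwrep]
    obtain ⟨qs, p, hqs, hp⟩ := sp_append_nonpipe c hc d'.reverse
    have hspu : sp u = qs ++ [p] := hqs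
    have hspcs : sp cs = qs ++ [p] ++ List.replicate k [] := by
      rw [hcs2, sp_append_replicate, hspu]
    have hfold : (PySem.List.enumerate (sp cs)).foldl
        (fun acc ip => if ip.2 ≠ [] then ip.1 else acc) (-1 : Int) = (qs.length : Int) := by
      rw [hspcs]
      have := fold_last qs p (List.replicate k []) 0 (-1) hp
        (fun q hq => List.eq_of_mem_replicate hq)
      rw [this]
      simp
    rw [hfold, if_pos (by positivity)]
    have htonat : ((qs.length : Int)).toNat = qs.length := by simp
    rw [htonat, hspcs]
    have hidx : qs.length < (qs ++ [p]).length := by simp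
    rw [List.set_append, if_pos (by simp)]
    have hsetu : (qs ++ [p]).set qs.length [] = (sp u).set ((sp u).length - 1) [] := by
      rw [hspu]
      congr 1
      simp
    rw [hsetu]
    have hne : (sp u).set ((sp u).length - 1) [] ≠ [] := by
      intro hcon
      have := congrArg List.length hcon
      simp at this
      exact sp_ne_nil u this
    rw [intercalate_append_replicate _ k hne, join_blank]
    -- identify s in canon with u
    have hs : (c :: d').reverse = u := by simp [hu]
    rw [hs]
    have hlen : cs.length - u.length = k := by
      have := congrArg List.length hcs2
      simp at this
      omega
    rw [hlen]

-- ===== VERDICT (by name: the statement is the Claim_ definition above) =====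
theorem findParentForStr_spec : Claim_equal_findParentForStr := by
  intro child _
  unfold Spec_findParentForStr
  have hA := findParentForStr_core child.toList
  have hB := alt_core child.toList
  have : findParentForStr (String.ofList child.toList)
      = findParentForStr_alt (String.ofList child.toList) := by rw [hA, hB]
  simpa using this
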